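-- pv_equiv track=rewrite | github.com/aditivinod/language-usage-analysis | gamer_words.py | remove_too_uncommon
-- ===== SOURCE A (Python) =====
-- def remove_too_uncommon(word_dictionary, threshold =20):
--     """
--     Remove words from a dictionary that show up less than a specified
--     number of times. Also remove entries that are strings longer than length 20
--     or words that fall into a specific type of typo.
--
--     Args:
--         word_dictionary: A dictionary with strings as keys representing words
--             and integers as values representing how many times that word
--             is used in a dataset.
--         threshold: An integer determining the minimum number of usages for a
--             word to be considered in the dictionary.
--     Returns:
--         word_return_dictionary: A dictionary with strings as keys representing
--             words and integers as values representing how many times that word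
--             is used in a dataset.
--     """
--
--     delete_word = [key for key in dict(word_dictionary).keys() if \
--         int(word_dictionary[key]) < threshold or len(key) > 20]
--
--     # Remove typo words that repeat themselves of the form "wordcword"
--     for key in dict(word_dictionary).keys():
--         if key not in delete_word and "c" in key and (len(key) - 1) % 2 == 0:
--             half_word = key[0:int((len(key)-1)/2)]
--             if half_word in key[int(((len(key)-1)/2)+1):len(key)]:
--                 delete_word.append(key)
--
--     # For key in delete_word: word_dictionary.pop(key)
--     word_return_dictionary = {word:value for (word,value) in \
--         word_dictionary.items() if word not in delete_word }
--
--
--     return word_return_dictionary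
-- ===== SOURCE B (Python) =====
-- def remove_too_uncommon(word_dictionary, threshold=20):
--     def is_typo(word):
--         n = len(word)
--         if "c" not in word or (n - 1) % 2 != 0:
--             return False
--         h = (n - 1) // 2
--         return word[:h] in word[h + 1:]
--
--     return {word: value for word, value in word_dictionary.items()
--             if int(value) >= threshold and len(word) <= 20 and not is_typo(word)}
-- ===== Notes on version B (the rewrite author's own statement) =====
-- stated objective: faster
-- what changed: Replaces A's three phases (build a delete_word list in one pass, extend it with typo keys in a second pass that scans delete_word for membership, then rebuild the dict filtering by 'not in delete_word') with a single comprehension over items() that keeps an entry iff it passes an inline keep-predicate (count >= threshold, length <= 20, not is_typo); no intermediate deletion table and no list-membership scans remain.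
import Mathlib
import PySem

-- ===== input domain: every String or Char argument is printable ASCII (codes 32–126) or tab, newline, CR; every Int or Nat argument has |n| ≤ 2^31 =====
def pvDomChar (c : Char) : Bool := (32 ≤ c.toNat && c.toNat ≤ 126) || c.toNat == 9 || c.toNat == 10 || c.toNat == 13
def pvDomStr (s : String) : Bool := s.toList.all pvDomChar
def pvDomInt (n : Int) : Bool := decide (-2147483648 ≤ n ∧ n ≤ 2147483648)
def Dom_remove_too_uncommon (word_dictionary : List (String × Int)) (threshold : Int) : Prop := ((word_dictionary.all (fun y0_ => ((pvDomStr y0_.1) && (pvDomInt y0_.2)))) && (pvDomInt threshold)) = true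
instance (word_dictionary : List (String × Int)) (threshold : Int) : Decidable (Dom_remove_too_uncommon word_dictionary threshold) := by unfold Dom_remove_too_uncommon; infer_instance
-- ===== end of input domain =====

-- B replaces A's three phases (delete-word list, typo append pass with membership scans into it,
-- rebuild of the dict filtering by 'not in delete_word') by a single filter of the items with an
-- inline keep-predicate; equal output is proved for all inputs.  The dict argument arrives as its
-- item list; both ports read it through PySem.Dict.ofList (Python dict construction: a duplicated
-- key overwrites in place), which is Python's dict semantics for this argument.

-- ===== PORT A =====
-- word_dictionary[key] is looked up with key drawn from the dict's own keys, so it always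
-- succeeds and getD _ 0 is exact there; int(value) on an int value is the identity.
def remove_too_uncommon (word_dictionary : List (String × Int)) (threshold : Int) : List (String × Int) :=
  let d := PySem.Dict.ofList word_dictionary
  let delete_word : List String :=
    d.keys.filter (fun key => decide (d.getD key 0 < threshold) || decide (20 < PySem.Str.len key))
  let delete_word :=
    d.keys.foldl (fun acc key =>
      if !acc.contains key && PySem.Str.isIn "c" key
          && (PySem.Int.mod ((PySem.Str.len key : Int) - 1) 2 == 0) then
        -- int((len(key)-1)/2) = (len(key)-1) // 2 exactly: the guard makes len(key)-1 even and ≥ 0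
        let half_word := PySem.Str.slice key (some 0)
          (some (PySem.Int.floordiv ((PySem.Str.len key : Int) - 1) 2))
        if PySem.Str.isIn half_word
            (PySem.Str.slice key (some (PySem.Int.floordiv ((PySem.Str.len key : Int) - 1) 2 + 1))
              (some (PySem.Str.len key : Int))) then
          acc ++ [key]
        else acc
      else acc) delete_word
  d.items.filter (fun p => !delete_word.contains p.1)

-- ===== PORT B =====
def pvIsTypo_alt (word : String) : Bool :=
  let n : Int := (PySem.Str.len word : Int)
  if !PySem.Str.isIn "c" word || !(PySem.Int.mod (n - 1) 2 == 0) then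
    false
  else
    let h := PySem.Int.floordiv (n - 1) 2
    PySem.Str.isIn (PySem.Str.slice word none (some h)) (PySem.Str.slice word (some (h + 1)) none)

def remove_too_uncommon_alt (word_dictionary : List (String × Int)) (threshold : Int) : List (String × Int) :=
  (PySem.Dict.ofList word_dictionary).items.filter
    (fun p => decide (threshold ≤ p.2) && decide (PySem.Str.len p.1 ≤ 20) && !pvIsTypo_alt p.1)

-- ===== PRECONDITION & SPEC =====
def Spec_remove_too_uncommon (word_dictionary : List (String × Int)) (threshold : Int) (out : List (String × Int)) : Prop := out = remove_too_uncommon_alt word_dictionary threshold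
instance (word_dictionary : List (String × Int)) (threshold : Int) (out : List (String × Int)) : Decidable (Spec_remove_too_uncommon word_dictionary threshold out) := by unfold Spec_remove_too_uncommon; infer_instance

-- ===== CLAIM (what is proved, stated in full; the proofs are below) =====
def Claim_equal_remove_too_uncommon : Prop := ∀ (word_dictionary : List (String × Int)) (threshold : Int), Dom_remove_too_uncommon word_dictionary threshold → Spec_remove_too_uncommon word_dictionary threshold (remove_too_uncommon word_dictionary threshold)

-- ===== LEMMAS AND PROOFS =====

-- A's typo test (the two nested conditions of its second loop, minus the membership guard)
def pvTypoA (key : String) : Bool :=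
  PySem.Str.isIn "c" key && (PySem.Int.mod ((PySem.Str.len key : Int) - 1) 2 == 0) &&
    PySem.Str.isIn
      (PySem.Str.slice key (some 0) (some (PySem.Int.floordiv ((PySem.Str.len key : Int) - 1) 2)))
      (PySem.Str.slice key (some (PySem.Int.floordiv ((PySem.Str.len key : Int) - 1) 2 + 1))
        (some (PySem.Str.len key : Int)))

lemma slice_len_none (l : List Char) (a : Int) :
    PySem.List.slice l (some a) (some (l.length : Int)) = PySem.List.slice l (some a) none := by
  simp only [PySem.List.slice, PySem.List.clampIdx]
  split_ifs <;> simp <;> omega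

lemma mod2_beq (x : Int) : (x % 2 == 0) = !decide (x % 2 = 1) := by
  have h1 := Int.emod_nonneg x (by norm_num : (2:Int) ≠ 0)
  have h2 := Int.emod_lt_of_pos x (by norm_num : (0:Int) < 2)
  by_cases h : x % 2 = 0
  · simp [h]
  · have h1 : x % 2 = 1 := by omega
    simp [h1]

lemma typoA_eq_alt (key : String) : pvTypoA key = pvIsTypo_alt key := by
  unfold pvTypoA pvIsTypo_alt
  simp [mod2_beq, Bool.and_assoc]
  rw [show ((key.length : Int)) = ((key.toList.length : Int)) from by simp, slice_len_none]

lemma step_eq (acc : List String) (key : String) :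
    (if !acc.contains key && PySem.Str.isIn "c" key
          && (PySem.Int.mod ((PySem.Str.len key : Int) - 1) 2 == 0) then
        let half_word := PySem.Str.slice key (some 0)
          (some (PySem.Int.floordiv ((PySem.Str.len key : Int) - 1) 2))
        if PySem.Str.isIn half_word
            (PySem.Str.slice key (some (PySem.Int.floordiv ((PySem.Str.len key : Int) - 1) 2 + 1))
              (some (PySem.Str.len key : Int))) then
          acc ++ [key]
        else acc
      else acc)
    = if !acc.contains key && pvTypoA key then acc ++ [key] else acc := by
  unfold pvTypoA
  cases acc.contains key <;> cases PySem.Str.isIn "c" key <;>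
    cases h : (PySem.Int.mod ((PySem.Str.len key : Int) - 1) 2 == 0) <;> simp [h] <;> split <;> simp

lemma mem_foldl_typo (l : List String) (acc : List String) (x : String) :
    x ∈ l.foldl (fun acc key =>
      if !acc.contains key && PySem.Str.isIn "c" key
          && (PySem.Int.mod ((PySem.Str.len key : Int) - 1) 2 == 0) then
        let half_word := PySem.Str.slice key (some 0)
          (some (PySem.Int.floordiv ((PySem.Str.len key : Int) - 1) 2))
        if PySem.Str.isIn half_word
            (PySem.Str.slice key (some (PySem.Int.floordiv ((PySem.Str.len key : Int) - 1) 2 + 1))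
              (some (PySem.Str.len key : Int))) then
          acc ++ [key]
        else acc
      else acc) acc ↔ x ∈ acc ∨ (x ∈ l ∧ pvTypoA x = true) := by
  induction l generalizing acc with
  | nil => simp
  | cons k l ih =>
    simp only [List.foldl_cons]
    rw [step_eq]
    cases hc : acc.contains k <;> cases hp : pvTypoA k
    · rw [if_neg (by simp [hp]), ih]
      simp only [List.mem_cons]
      constructor
      · tauto
      · rintro (h | ⟨(rfl | h), ht⟩) <;> first | tauto | (rw [ht] at hp; cases hp)
    · rw [if_pos (by simp), ih]
      simp only [List.mem_append, List.mem_cons, List.not_mem_nil]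
      constructor
      · rintro ((h | (rfl | h)) | h) <;> tauto
      · rintro (h | ⟨(rfl | h), ht⟩) <;> tauto
    · rw [if_neg (by simp), ih]
      have hm : k ∈ acc := List.contains_iff_mem.mp hc
      simp only [List.mem_cons]
      constructor
      · tauto
      · rintro (h | ⟨(rfl | h), ht⟩) <;> tauto
    · rw [if_neg (by simp), ih]
      have hm : k ∈ acc := List.contains_iff_mem.mp hc
      simp only [List.mem_cons]
      constructor
      · tauto
      · rintro (h | ⟨(rfl | h), ht⟩) <;> tauto

lemma bool_keep (X : List String) (w : String) (v threshold : Int)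
    (h : w ∈ X ↔ ((v < threshold ∨ 20 < PySem.Str.len w) ∨ pvIsTypo_alt w = true)) :
    (!X.contains w) = (decide (threshold ≤ v) && decide (PySem.Str.len w ≤ 20) && !pvIsTypo_alt w) := by
  cases hxw : X.contains w
  · have hnm : ¬ w ∈ X := fun hm => by rw [← List.contains_iff_mem, hxw] at hm; cases hm
    rw [h] at hnm
    push Not at hnm
    obtain ⟨⟨h1, h2⟩, h3⟩ := hnm
    have h2' : w.length ≤ 20 := by simpa using h2
    simp [h3, show threshold ≤ v by omega, show w.length ≤ 20 by omega]
  · have hm := h.mp (List.contains_iff_mem.mp hxw)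
    rcases hm with (h1 | h1) | h1
    · simp [show ¬ (threshold ≤ v) by omega]
    · have h1' : 20 < w.length := by simpa using h1
      simp [show ¬ (w.length ≤ 20) by omega]
    · simp [h1]

lemma keep_eq (d : PySem.Dict String Int) (threshold : Int) (w : String) (v : Int)
    (hp : (w, v) ∈ d.items) (hnd : d.keys.Nodup) :
    (!(d.keys.foldl (fun acc key =>
      if !acc.contains key && PySem.Str.isIn "c" key
          && (PySem.Int.mod ((PySem.Str.len key : Int) - 1) 2 == 0) then
        let half_word := PySem.Str.slice key (some 0)
          (some (PySem.Int.floordiv ((PySem.Str.len key : Int) - 1) 2))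
        if PySem.Str.isIn half_word
            (PySem.Str.slice key (some (PySem.Int.floordiv ((PySem.Str.len key : Int) - 1) 2 + 1))
              (some (PySem.Str.len key : Int))) then
          acc ++ [key]
        else acc
      else acc)
      (d.keys.filter (fun key => decide (d.getD key 0 < threshold) || decide (20 < PySem.Str.len key)))).contains w)
    = (decide (threshold ≤ v) && decide (PySem.Str.len w ≤ 20) && !pvIsTypo_alt w) := by
  have hkm : w ∈ d.keys := PySem.Dict.mem_keys_of_mem_items d hp
  have hg : d.getD w 0 = v := PySem.Dict.getD_of_mem_items d hp hnd 0
  apply bool_keep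
  rw [mem_foldl_typo, List.mem_filter]
  simp [hkm, hg, typoA_eq_alt]

-- ===== VERDICT (by name: the statement is the Claim_ definition above) =====
theorem remove_too_uncommon_spec : Claim_equal_remove_too_uncommon := by
  intro wd threshold _dom
  unfold Spec_remove_too_uncommon remove_too_uncommon remove_too_uncommon_alt
  apply List.filter_congr
  rintro ⟨w, v⟩ hp
  exact keep_eq (PySem.Dict.ofList wd) threshold w v hp (PySem.Dict.nodup_keys_ofList wd)
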